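-- pv_equiv track=rewrite | github.com/virajkulkarni1/DigitalLogicSimulator | digital-logic-simulator/main.py | convert_to_function_calls
-- ===== SOURCE A (Python) =====
-- def convert_to_function_calls(expression):
--     """Convert infix notation (A AND B) to function calls (AND(A, B)).
--
--     Uses a recursive descent parser that handles operator precedence:
--     - NOT (highest precedence, unary)
--     - AND, NAND (binary)
--     - OR, NOR, XOR (lowest precedence, binary)
--     """
--     expression = expression.strip()
--
--     # Remove outer parentheses if the entire expression is wrapped
--     depth = 0
--     can_remove = True
--     for i, char in enumerate(expression):
--         if char == '(':
--             depth += 1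
--         elif char == ')':
--             depth -= 1
--             if depth == 0 and i < len(expression) - 1:
--                 can_remove = False
--                 break
--     if can_remove and expression.startswith('(') and expression.endswith(')'):
--         expression = expression[1:-1].strip()
--
--     # Operator precedence (process from lowest to highest)
--     # OR, NOR, XOR have lowest precedence (processed first)
--     # AND, NAND have higher precedence
--     # NOT has highest precedence (processed last, but handled separately)
--
--     # Process OR, NOR, XOR (lowest precedence, left-associative)
--     for op in ['OR', 'NOR', 'XOR']:
--         depth = 0
--         # Find the rightmost occurrence at top level
--         for i in range(len(expression) - len(op), -1, -1):
--             if expression[i:i+len(op)] == op: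
--                 # Check if we're at word boundaries and top level
--                 if (i == 0 or not expression[i-1].isalnum()) and \
--                    (i+len(op) >= len(expression) or not expression[i+len(op)].isalnum()):
--                     # Check if we're at top level (depth == 0)
--                     substr_before = expression[:i]
--                     depth_before = substr_before.count('(') - substr_before.count(')')
--                     if depth_before == 0:
--                         left = expression[:i].strip()
--                         right = expression[i+len(op):].strip()
--                         left_conv = convert_to_function_calls(left)
--                         right_conv = convert_to_function_calls(right)
--                         return f'{op}({left_conv}, {right_conv})'
--
--     # Process AND, NAND (higher precedence)
--     for op in ['AND', 'NAND']:
--         depth = 0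
--         # Find the rightmost occurrence at top level
--         for i in range(len(expression) - len(op), -1, -1):
--             if expression[i:i+len(op)] == op:
--                 # Check if we're at word boundaries and top level
--                 if (i == 0 or not expression[i-1].isalnum()) and \
--                    (i+len(op) >= len(expression) or not expression[i+len(op)].isalnum()):
--                     # Check if we're at top level (depth == 0)
--                     substr_before = expression[:i]
--                     depth_before = substr_before.count('(') - substr_before.count(')')
--                     if depth_before == 0:
--                         left = expression[:i].strip()
--                         right = expression[i+len(op):].strip()
--                         left_conv = convert_to_function_calls(left)
--                         right_conv = convert_to_function_calls(right)
--                         return f'{op}({left_conv}, {right_conv})'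
--
--     # Process NOT (unary, highest precedence)
--     if expression.startswith('NOT '):
--         arg = expression[4:].strip()
--         # Remove parentheses if the entire argument is wrapped
--         if arg.startswith('(') and arg.endswith(')'):
--             depth = 0
--             can_remove = True
--             for i, char in enumerate(arg):
--                 if char == '(':
--                     depth += 1
--                 elif char == ')':
--                     depth -= 1
--                     if depth == 0 and i < len(arg) - 1:
--                         can_remove = False
--                         break
--             if can_remove:
--                 arg = arg[1:-1].strip()
--         arg_conv = convert_to_function_calls(arg)
--         return f'NOT({arg_conv})'
--
--     # If no operators found, return as-is (should be a variable)
--     return expression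
-- ===== SOURCE B (Python) =====
-- def _strip_outer(expression):
--     """Remove one pair of wrapping parentheses if they span the whole expression."""
--     depth = 0
--     can_remove = True
--     for i, char in enumerate(expression):
--         if char == '(':
--             depth += 1
--         elif char == ')':
--             depth -= 1
--             if depth == 0 and i < len(expression) - 1:
--                 can_remove = False
--                 break
--     if can_remove and expression.startswith('(') and expression.endswith(')'):
--         return expression[1:-1].strip()
--     return expression
--
--
-- _OPS = ['OR', 'NOR', 'XOR', 'AND', 'NAND']
--
--
-- def convert_to_function_calls(expression):
--     """Convert infix notation (A AND B) to function calls (AND(A, B)).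
--
--     Single left-to-right pass with a running parenthesis depth records the
--     rightmost top-level occurrence of each operator; the split operator is
--     then chosen by precedence (OR/NOR/XOR before AND/NAND, NOT last).
--     """
--     expression = _strip_outer(expression.strip())
--     n = len(expression)
--     last = {}
--     depth = 0
--     for i in range(n):
--         ch = expression[i]
--         if depth == 0:
--             for op in _OPS:
--                 if expression.startswith(op, i) and \
--                    (i == 0 or not expression[i - 1].isalnum()) and \
--                    (i + len(op) >= n or not expression[i + len(op)].isalnum()):
--                     last[op] = i
--         if ch == '(':
--             depth += 1
--         elif ch == ')':
--             depth -= 1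
--     for op in _OPS:
--         if op in last:
--             i = last[op]
--             left = convert_to_function_calls(expression[:i].strip())
--             right = convert_to_function_calls(expression[i + len(op):].strip())
--             return f'{op}({left}, {right})'
--     if expression.startswith('NOT '):
--         arg = _strip_outer(expression[4:].strip())
--         return f'NOT({convert_to_function_calls(arg)})'
--     return expression
-- ===== Notes on version B (the rewrite author's own statement) =====
-- stated objective: alternative
-- what changed: A runs a separate right-to-left scan for each of the five operators and recomputes the parenthesis depth of the whole prefix with two count() calls at every candidate position; B makes one left-to-right pass maintaining a running depth and a table of the rightmost top-level match per operator, then picks the split operator by precedence, and factors the duplicated outer-parenthesis removal into one helper.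
import Mathlib
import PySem

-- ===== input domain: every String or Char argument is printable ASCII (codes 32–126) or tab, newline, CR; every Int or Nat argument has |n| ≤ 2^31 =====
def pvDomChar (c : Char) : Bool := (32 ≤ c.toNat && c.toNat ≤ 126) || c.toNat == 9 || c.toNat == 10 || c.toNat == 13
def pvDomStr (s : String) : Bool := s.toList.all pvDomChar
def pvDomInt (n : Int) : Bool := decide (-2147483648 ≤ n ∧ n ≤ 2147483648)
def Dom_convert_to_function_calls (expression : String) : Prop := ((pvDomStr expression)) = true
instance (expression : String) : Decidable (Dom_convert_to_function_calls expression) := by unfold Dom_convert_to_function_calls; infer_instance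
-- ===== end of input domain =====

-- B replaces A's five right-to-left operator scans (each recomputing the prefix parenthesis depth
-- with two count() passes at every candidate) by ONE left-to-right pass with a running depth and a
-- table of the rightmost top-level match per operator; objective: alternative (not faster).

-- ===== PORT A =====
-- A's "can_remove" loop (enumerate with break); `rest ≠ []` is exactly Python's `i < len(expression) - 1`.
def pvCanRemove (depth : Int) : List Char → Bool
  | [] => true
  | c :: rest =>
    if c = '(' then pvCanRemove (depth + 1) rest
    else if c = ')' then
      if depth - 1 = 0 ∧ rest ≠ [] then false else pvCanRemove (depth - 1) rest
    else pvCanRemove depth rest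

-- A's candidate test at (Int) index i: substring match, word boundaries, prefix depth 0 (two counts).
def pvMatchA (e op : List Char) (i : Int) : Bool :=
  (PySem.List.slice e (some i) (some (i + (op.length : Int))) == op)
  && ((i == 0) || !(PySem.Chars.isalnum (PySem.List.pyGetD e (i - 1) ' ')))
  && (decide ((e.length : Int) ≤ i + (op.length : Int))
        || !(PySem.Chars.isalnum (PySem.List.pyGetD e (i + (op.length : Int)) ' ')))
  && (((PySem.Chars.count (PySem.List.slice e none (some i)) ['('] : Int)
        - (PySem.Chars.count (PySem.List.slice e none (some i)) [')'] : Int)) == 0)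

-- for i in range(len(expression) - len(op), -1, -1): first (= rightmost) i passing the test
def pvFindOpA (e op : List Char) : Option Int :=
  (PySem.List.pyRange ((e.length : Int) - (op.length : Int)) (-1) (-1)).find? (pvMatchA e op)

-- for op in ops: return on the first op that has a match
def pvFindGroupA (e : List Char) : List (List Char) → Option (List Char × Int)
  | [] => none
  | op :: rest =>
    match pvFindOpA e op with
    | some i => some (op, i)
    | none => pvFindGroupA e rest

-- fuel = one unit per recursion level; every recursive call is on a strictly shorter string,
-- so the initial fuel (length + 1) is never exhausted and the 0-case is unreachable.
def pvGoA : Nat → List Char → List Char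
  | 0, cs => cs
  | f + 1, cs =>
    let e := PySem.Chars.strip cs
    let e := if pvCanRemove 0 e && PySem.Chars.startswith e ['('] && PySem.Chars.endswith e [')']
             then PySem.Chars.strip (PySem.List.slice e (some 1) (some (-1))) else e
    match pvFindGroupA e [['O','R'], ['N','O','R'], ['X','O','R']] with
    | some (op, i) =>
        op ++ '(' :: (pvGoA f (PySem.Chars.strip (PySem.List.slice e none (some i)))
          ++ ',' :: ' ' :: pvGoA f (PySem.Chars.strip (PySem.List.slice e (some (i + (op.length : Int))) none)) ++ [')'])
    | none =>
      match pvFindGroupA e [['A','N','D'], ['N','A','N','D']] with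
      | some (op, i) =>
          op ++ '(' :: (pvGoA f (PySem.Chars.strip (PySem.List.slice e none (some i)))
            ++ ',' :: ' ' :: pvGoA f (PySem.Chars.strip (PySem.List.slice e (some (i + (op.length : Int))) none)) ++ [')'])
      | none =>
        if PySem.Chars.startswith e ['N','O','T',' '] then
          let arg := PySem.Chars.strip (PySem.List.slice e (some 4) none)
          let arg := if PySem.Chars.startswith arg ['('] && PySem.Chars.endswith arg [')'] then
                       (if pvCanRemove 0 arg then PySem.Chars.strip (PySem.List.slice arg (some 1) (some (-1))) else arg)
                     else arg
          'N' :: 'O' :: 'T' :: '(' :: (pvGoA f arg ++ [')'])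
        else e

def convert_to_function_calls (expression : String) : String :=
  String.ofList (pvGoA (expression.toList.length + 1) expression.toList)

-- ===== PORT B =====
def pvOps : List (List Char) := [['O','R'], ['N','O','R'], ['X','O','R'], ['A','N','D'], ['N','A','N','D']]

-- B's _strip_outer helper (the same removal loop as A's, written once)
def pvStripOuter (e : List Char) : List Char :=
  if pvCanRemove 0 e && PySem.Chars.startswith e ['('] && PySem.Chars.endswith e [')']
  then PySem.Chars.strip (PySem.List.slice e (some 1) (some (-1))) else e

-- expression.startswith(op, i) plus the two word-boundary tests (Nat index i)
def pvMatchB (e : List Char) (i : Nat) (op : List Char) : Bool :=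
  PySem.Chars.startswith (e.drop i) op
  && ((i == 0) || !(PySem.Chars.isalnum (PySem.List.pyGetD e ((i : Int) - 1) ' ')))
  && (decide (e.length ≤ i + op.length)
        || !(PySem.Chars.isalnum (PySem.List.pyGetD e ((i : Int) + (op.length : Int)) ' ')))

-- the single pass: running depth, dict `last` = rightmost top-level match per operator so far
def pvScanB (e : List Char) : List Char → Nat → Int → PySem.Dict (List Char) Int → PySem.Dict (List Char) Int
  | [], _, _, last => last
  | c :: rest, i, depth, last =>
    let last' := if depth == 0
                 then pvOps.foldl (fun d op => if pvMatchB e i op then d.insert op (i : Int) else d) last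
                 else last
    pvScanB e rest (i + 1) (if c == '(' then depth + 1 else if c == ')' then depth - 1 else depth) last'

-- for op in ops: if op in last: …
def pvChooseB (last : PySem.Dict (List Char) Int) : List (List Char) → Option (List Char × Int)
  | [] => none
  | op :: rest =>
    match last.get? op with
    | some i => some (op, i)
    | none => pvChooseB last rest

def pvGoB : Nat → List Char → List Char
  | 0, cs => cs
  | f + 1, cs =>
    let e := pvStripOuter (PySem.Chars.strip cs)
    match pvChooseB (pvScanB e e 0 0 PySem.Dict.empty) pvOps with
    | some (op, i) =>
        op ++ '(' :: (pvGoB f (PySem.Chars.strip (PySem.List.slice e none (some i)))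
          ++ ',' :: ' ' :: pvGoB f (PySem.Chars.strip (PySem.List.slice e (some (i + (op.length : Int))) none)) ++ [')'])
    | none =>
      if PySem.Chars.startswith e ['N','O','T',' '] then
        'N' :: 'O' :: 'T' :: '(' :: (pvGoB f (pvStripOuter (PySem.Chars.strip (PySem.List.slice e (some 4) none))) ++ [')'])
      else e

def convert_to_function_calls_alt (expression : String) : String :=
  String.ofList (pvGoB (expression.toList.length + 1) expression.toList)

-- ===== PRECONDITION & SPEC =====
def Spec_convert_to_function_calls (expression : String) (out : String) : Prop := out = convert_to_function_calls_alt expression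
instance (expression : String) (out : String) : Decidable (Spec_convert_to_function_calls expression out) := by unfold Spec_convert_to_function_calls; infer_instance

-- ===== CLAIM (what is proved, stated in full; the proofs are below) =====
def Claim_equal_convert_to_function_calls : Prop := ∀ (expression : String), Dom_convert_to_function_calls expression → Spec_convert_to_function_calls expression (convert_to_function_calls expression)

-- ===== LEMMAS AND PROOFS =====

-- prefix parenthesis depth, and the common "top-level match of op at i" predicate
def pvDep (l : List Char) : Int :=
  (PySem.Chars.count l ['('] : Int) - (PySem.Chars.count l [')'] : Int)

def pvP (e op : List Char) (i : Nat) : Bool :=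
  (pvDep (e.take i) == 0) && pvMatchB e i op

-- common spec: the rightmost i with a top-level match of op
def pvSpecOp (e op : List Char) : Option Int :=
  (((List.range e.length).filter (pvP e op)).getLast?).map (fun (k : Nat) => (k : Int))

-- A's two cascaded group searches, as one selection function
def pvSelA (e : List Char) : Option (List Char × Int) :=
  match pvFindGroupA e [['O','R'], ['N','O','R'], ['X','O','R']] with
  | some x => some x
  | none => pvFindGroupA e [['A','N','D'], ['N','A','N','D']]

-- A's inline top-level unwrapping is B's helper, definitionally
theorem pvTopStrip_eq (x : List Char) :
    (if pvCanRemove 0 x && PySem.Chars.startswith x ['('] && PySem.Chars.endswith x [')']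
     then PySem.Chars.strip (PySem.List.slice x (some 1) (some (-1))) else x) = pvStripOuter x := rfl

-- ---- generic list facts ----
theorem pvFind?_eq_head?_filter {α : Type} (p : α → Bool) (l : List α) :
    l.find? p = (l.filter p).head? := by
  induction l with
  | nil => rfl
  | cons a l ih =>
    by_cases h : p a = true
    · rw [List.find?_cons_of_pos h, List.filter_cons_of_pos h, List.head?_cons]
    · rw [List.find?_cons_of_neg h, List.filter_cons_of_neg h, ih]

theorem pvFindRev {α : Type} (p : α → Bool) (l : List α) :
    l.reverse.find? p = (l.filter p).getLast? := by
  rw [pvFind?_eq_head?_filter, List.filter_reverse, List.head?_reverse]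

-- ---- single-character Chars.count is List.count ----
theorem pvCountGo (c : Char) : ∀ (fuel : Nat) (l : List Char) (acc : Nat), l.length ≤ fuel →
    PySem.Chars.count.go [c] fuel l acc = acc + l.count c := by
  intro fuel
  induction fuel with
  | zero =>
    intro l acc h
    have hl : l = [] := by cases l <;> simp_all
    subst hl
    rw [PySem.Chars.count.go.eq_def]; rfl
  | succ f ih =>
    intro l acc h
    cases l with
    | nil => rw [PySem.Chars.count.go.eq_def]; rfl
    | cons a t =>
      have hred : PySem.Chars.count.go [c] (f + 1) (a :: t) acc
          = if ([c].isPrefixOf (a :: t)) = true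
            then PySem.Chars.count.go [c] f t (acc + 1)
            else PySem.Chars.count.go [c] f t acc := by
        rw [PySem.Chars.count.go.eq_def]; rfl
      have hpre : ([c].isPrefixOf (a :: t)) = (c == a) := by simp [List.isPrefixOf]
      have hlen : t.length ≤ f := by simp at h; omega
      rw [hred, hpre]
      by_cases hc : c = a
      · rw [if_pos (by simp [hc]), ih t (acc + 1) hlen, List.count_cons]
        have : (a == c) = true := by simp [hc]
        rw [this]
        simp; omega
      · rw [if_neg (by simp [hc]), ih t acc hlen, List.count_cons]
        have : (a == c) = false := by simp; intro hh; exact absurd hh.symm hc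
        rw [this]
        simp

theorem pvCount1 (l : List Char) (c : Char) : PySem.Chars.count l [c] = l.count c := by
  have h : ([c] : List Char).isEmpty = false := rfl
  rw [PySem.Chars.count, h]
  simpa using pvCountGo c l.length l 0 le_rfl

theorem pvDep_nil : pvDep [] = 0 := by simp [pvDep, pvCount1]

theorem pvDep_append_singleton (l : List Char) (c : Char) :
    pvDep (l ++ [c]) = pvDep l + (if c = '(' then 1 else if c = ')' then -1 else 0) := by
  simp only [pvDep, pvCount1, List.count_append, List.count_cons, List.count_nil, beq_iff_eq]
  rcases eq_or_ne c '(' with rfl | h1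
  · rw [if_pos rfl, if_pos rfl, if_neg (by decide)]
    push_cast; ring
  · rcases eq_or_ne c ')' with rfl | h2
    · rw [if_neg (by decide), if_pos rfl, if_neg (by decide), if_pos rfl]
      push_cast; ring
    · rw [if_neg h1, if_neg h2, if_neg h1, if_neg h2]
      push_cast; ring

-- ---- Chars.strip does not lengthen ----
theorem pvStrip_le (s : List Char) : (PySem.Chars.strip s).length ≤ s.length := by
  unfold PySem.Chars.strip PySem.Chars.rstrip PySem.Chars.lstrip
  calc (List.dropWhile PySem.Chars.isspace (List.dropWhile PySem.Chars.isspace s).reverse).reverse.length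
      = (List.dropWhile PySem.Chars.isspace (List.dropWhile PySem.Chars.isspace s).reverse).length := by
        rw [List.length_reverse]
    _ ≤ (List.dropWhile PySem.Chars.isspace s).reverse.length := List.length_dropWhile_le _ _
    _ = (List.dropWhile PySem.Chars.isspace s).length := by rw [List.length_reverse]
    _ ≤ s.length := List.length_dropWhile_le _ _

theorem pvStripOuter_length_le (e : List Char) : (pvStripOuter e).length ≤ e.length := by
  unfold pvStripOuter
  split
  · refine le_trans (pvStrip_le _) ?_
    rw [PySem.List.length_slice]
    have h1 := PySem.List.clampIdx_le e.length (-1)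
    omega
  · exact le_rfl

-- ---- pvMatchB forces the match to fit ----
theorem pvMatchB_fits {e op : List Char} {k : Nat} (hop : 1 ≤ op.length)
    (h : pvMatchB e k op = true) : k + op.length ≤ e.length := by
  unfold pvMatchB at h
  have hsw : PySem.Chars.startswith (e.drop k) op = true := by
    rcases Bool.and_eq_true_iff.mp h with ⟨h1, _⟩
    rcases Bool.and_eq_true_iff.mp h1 with ⟨h2, _⟩
    exact h2
  have := ((PySem.Chars.startswith_iff _ _).mp hsw).length_le
  rw [List.length_drop] at this
  omega

theorem pvP_fits {e op : List Char} {k : Nat} (hop : 1 ≤ op.length) (h : pvP e op k = true) :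
    k + op.length ≤ e.length :=
  pvMatchB_fits hop (Bool.and_eq_true_iff.mp h).2

-- ---- A's candidate test equals the common predicate ----
theorem pvMatch_eq (e op : List Char) (k : Nat) :
    pvMatchA e op (k : Int) = pvP e op k := by
  unfold pvMatchA pvP pvMatchB pvDep
  rw [PySem.List.slice_natCast_add, PySem.List.slice_to_natCast]
  have hA : (List.take op.length (List.drop k e) == op) = PySem.Chars.startswith (e.drop k) op := by
    rw [Bool.eq_iff_iff]
    constructor
    · intro h
      exact (PySem.Chars.startswith_iff _ _).mpr
        (List.prefix_iff_eq_take.mpr (beq_iff_eq.mp h).symm)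
    · intro h
      exact beq_iff_eq.mpr (List.prefix_iff_eq_take.mp ((PySem.Chars.startswith_iff _ _).mp h)).symm
  have hB : (((k : Nat) : Int) == (0 : Int)) = (k == 0) := by
    rw [Bool.eq_iff_iff]; simp
  have hC : (decide ((e.length : Int) ≤ (k : Int) + (op.length : Int)))
      = decide (e.length ≤ k + op.length) := by
    rw [decide_eq_decide]
    constructor <;> intro h <;> omega
  rw [hA, hB, hC, Bool.and_comm]

-- ---- A's range extends one slot beyond B's, with no matches in the extension ----
theorem pvFilter_ext (e op : List Char) (hop : 1 ≤ op.length) (hn : op.length ≤ e.length) :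
    (List.range (e.length - op.length + 1)).filter (fun k => pvMatchA e op ((k : Nat) : Int))
      = (List.range e.length).filter (pvP e op) := by
  have hsplit : e.length = (e.length - op.length + 1) + (op.length - 1) := by omega
  conv_rhs => rw [hsplit, List.range_add, List.filter_append]
  have h2 : (List.map (fun x => (e.length - op.length + 1) + x) (List.range (op.length - 1))).filter
      (pvP e op) = [] := by
    rw [List.filter_eq_nil_iff]
    intro k hk hP
    simp only [List.mem_map, List.mem_range] at hk
    obtain ⟨x, hx, rfl⟩ := hk
    have := pvP_fits hop hP
    omega
  rw [h2, List.append_nil]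
  exact List.filter_congr (fun k _ => pvMatch_eq e op k)

-- ---- A's rightmost right-to-left search = last match of the range ----
theorem pvFindOpA_eq_spec (e op : List Char) (hop : 1 ≤ op.length) :
    pvFindOpA e op = pvSpecOp e op := by
  by_cases hn : e.length < op.length
  · have h1 : pvFindOpA e op = none := by
      unfold pvFindOpA
      rw [PySem.List.pyRange_neg_one_eq_nil (by omega)]
      rfl
    have h2 : (List.range e.length).filter (pvP e op) = [] := by
      rw [List.filter_eq_nil_iff]
      intro k hk hP
      have := pvP_fits hop hP
      omega
    rw [h1]
    unfold pvSpecOp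
    rw [h2]
    rfl
  · have hn' : op.length ≤ e.length := by omega
    have hM : (e.length : Int) - (op.length : Int) = ((e.length - op.length : Nat) : Int) := by
      omega
    unfold pvFindOpA
    rw [hM, PySem.List.pyRange_neg_one_eq_reverse]
    have h0 : (-1 : Int) + 1 = 0 := by norm_num
    rw [h0, PySem.List.pyRange_one]
    have hlen : ((((e.length - op.length : Nat) : Int) + 1) - 0).toNat = (e.length - op.length) + 1 := by
      omega
    rw [hlen, ← List.map_reverse, List.find?_map, pvFindRev]
    simp only [Function.comp_def, zero_add]
    rw [pvFilter_ext e op hop hn']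
    unfold pvSpecOp
    rfl

-- ---- dict foldl over the operator list ----
theorem pvFoldIns_get_notmem (ops : List (List Char)) (c : List Char → Bool) (v : Int)
    (op : List Char) (hop : op ∉ ops) :
    ∀ d : PySem.Dict (List Char) Int,
      (ops.foldl (fun d o => if c o then d.insert o v else d) d).get? op = d.get? op := by
  induction ops with
  | nil => intro d; rfl
  | cons o rest ih =>
    intro d
    have hne : op ≠ o := fun h => hop (h ▸ List.mem_cons_self)
    have hrest : op ∉ rest := fun h => hop (List.mem_cons_of_mem _ h)
    rw [List.foldl_cons, ih hrest]
    split
    · exact PySem.Dict.get?_insert_of_ne d v hne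
    · rfl

theorem pvFoldIns_get (ops : List (List Char)) (hnd : ops.Nodup) (op : List Char) (hop : op ∈ ops)
    (c : List Char → Bool) (v : Int) :
    ∀ d : PySem.Dict (List Char) Int,
      (ops.foldl (fun d o => if c o then d.insert o v else d) d).get? op
        = if c op then some v else d.get? op := by
  induction ops with
  | nil => cases hop
  | cons o rest ih =>
    intro d
    rcases List.mem_cons.mp hop with rfl | hmem
    · have hnr : op ∉ rest := (List.nodup_cons.mp hnd).1
      rw [List.foldl_cons, pvFoldIns_get_notmem rest c v op hnr]
      split
      · rw [PySem.Dict.get?_insert]; simp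
      · rfl
    · have hne : op ≠ o := by
        rintro rfl
        exact (List.nodup_cons.mp hnd).1 hmem
      rw [List.foldl_cons, ih (List.nodup_cons.mp hnd).2 hmem]
      split
      · rfl
      · split
        · exact PySem.Dict.get?_insert_of_ne d v hne
        · rfl

-- ---- the single pass computes the rightmost top-level match of every operator ----
theorem pvScan_inv (e op : List Char) (hop : op ∈ pvOps) :
    ∀ (suffix : List Char) (i : Nat) (last : PySem.Dict (List Char) Int), suffix = e.drop i →
      (pvScanB e suffix i (pvDep (e.take i)) last).get? op
        = ((((List.range' i (e.length - i)).filter (pvP e op)).getLast?).map (fun (k : Nat) => (k : Int))).or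
            (last.get? op) := by
  intro suffix
  induction suffix with
  | nil =>
    intro i last h
    have hlen : e.length ≤ i := List.drop_eq_nil_iff.mp h.symm
    have h0 : e.length - i = 0 := by omega
    rw [h0]
    simp [pvScanB, Option.none_or]
  | cons c rest ih =>
    intro i last h
    have hi : i < e.length := by
      by_contra hc
      rw [List.drop_eq_nil_iff.mpr (by omega)] at h
      cases h
    rw [List.drop_eq_getElem_cons hi] at h
    injection h with hc hrest
    subst hc
    simp only [pvScanB]
    have hdep : (if (e[i] == '(') then pvDep (e.take i) + 1
        else if (e[i] == ')') then pvDep (e.take i) - 1 else pvDep (e.take i))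
        = pvDep (e.take (i + 1)) := by
      rw [List.take_add_one, List.getElem?_eq_getElem hi, Option.toList_some,
        pvDep_append_singleton]
      by_cases h1 : e[i] = '('
      · rw [if_pos (by simp [h1]), if_pos h1]
      · rw [if_neg (by simp [h1]), if_neg h1]
        by_cases h2 : e[i] = ')'
        · rw [if_pos (by simp [h2]), if_pos h2]; ring
        · rw [if_neg (by simp [h2]), if_neg h2]; ring
    rw [hdep, ih (i + 1) _ hrest]
    have hcount : e.length - i = (e.length - (i + 1)) + 1 := by omega
    rw [hcount, List.range'_succ, List.filter_cons]
    by_cases hb : (pvDep (e.take i) == 0) = true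
    · rw [if_pos hb, pvFoldIns_get pvOps (by decide) op hop (pvMatchB e i) (i : Int) last]
      by_cases hm : pvMatchB e i op = true
      · have hP : pvP e op i = true := by rw [pvP, hb, hm]; rfl
        rw [if_pos hm, if_pos hP, List.getLast?_cons]
        cases ((List.range' (i + 1) (e.length - (i + 1)) 1).filter (pvP e op)).getLast? <;> rfl
      · have hP : ¬ (pvP e op i = true) := by
          rw [pvP]
          intro hcontra
          exact hm (Bool.and_eq_true_iff.mp hcontra).2
        rw [if_neg hm, if_neg hP]
    · rw [if_neg hb]
      have hP : ¬ (pvP e op i = true) := by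
        rw [pvP]
        intro hcontra
        exact hb (by rw [(Bool.and_eq_true_iff.mp hcontra).1])
      rw [if_neg hP]

theorem pvScanB_get (e op : List Char) (hop : op ∈ pvOps) :
    (pvScanB e e 0 0 PySem.Dict.empty).get? op = pvSpecOp e op := by
  have h0 : (0 : Int) = pvDep (e.take 0) := by rw [List.take_zero, pvDep_nil]
  rw [h0, pvScan_inv e op hop e 0 PySem.Dict.empty (by rw [List.drop_zero]),
    PySem.Dict.get?_empty, Option.or_none]
  unfold pvSpecOp
  rw [List.range_eq_range']
  simp

-- ---- bounds from a successful selection ----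
theorem pvSpecOp_bounds (e op : List Char) (hop : 1 ≤ op.length) (i : Int)
    (h : pvSpecOp e op = some i) :
    ∃ k : Nat, i = (k : Int) ∧ k + op.length ≤ e.length := by
  unfold pvSpecOp at h
  obtain ⟨k, hk, hki⟩ := Option.map_eq_some_iff.mp h
  exact ⟨k, hki.symm, pvP_fits hop (List.mem_filter.mp (List.mem_of_getLast? hk)).2⟩

-- ---- the two selection cascades agree ----
theorem pvSel_eq (e : List Char) :
    pvSelA e = pvChooseB (pvScanB e e 0 0 PySem.Dict.empty) pvOps := by
  have e1 := pvFindOpA_eq_spec e ['O','R'] (by decide)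
  have e2 := pvFindOpA_eq_spec e ['N','O','R'] (by decide)
  have e3 := pvFindOpA_eq_spec e ['X','O','R'] (by decide)
  have e4 := pvFindOpA_eq_spec e ['A','N','D'] (by decide)
  have e5 := pvFindOpA_eq_spec e ['N','A','N','D'] (by decide)
  have g1 := pvScanB_get e ['O','R'] (by decide)
  have g2 := pvScanB_get e ['N','O','R'] (by decide)
  have g3 := pvScanB_get e ['X','O','R'] (by decide)
  have g4 := pvScanB_get e ['A','N','D'] (by decide)
  have g5 := pvScanB_get e ['N','A','N','D'] (by decide)
  simp only [pvSelA, pvFindGroupA, pvChooseB, pvOps, e1, e2, e3, e4, e5, g1, g2, g3, g4, g5]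
  cases pvSpecOp e ['O','R'] <;> cases pvSpecOp e ['N','O','R'] <;> cases pvSpecOp e ['X','O','R']
    <;> cases pvSpecOp e ['A','N','D'] <;> cases pvSpecOp e ['N','A','N','D'] <;> rfl

theorem pvFindGroupA_some (e : List Char) :
    ∀ (ops : List (List Char)) (op : List Char) (i : Int),
      pvFindGroupA e ops = some (op, i) → op ∈ ops ∧ pvFindOpA e op = some i := by
  intro ops
  induction ops with
  | nil => intro op i h; cases h
  | cons o rest ih =>
    intro op i h
    unfold pvFindGroupA at h
    revert h
    cases ho : pvFindOpA e o with
    | some j =>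
      intro h
      have hp : (o, j) = (op, i) := Option.some.inj h
      obtain ⟨rfl, rfl⟩ : o = op ∧ j = i := ⟨congrArg Prod.fst hp, congrArg Prod.snd hp⟩
      exact ⟨List.mem_cons_self, ho⟩
    | none =>
      intro h
      rcases ih op i h with ⟨hm, hf⟩
      exact ⟨List.mem_cons_of_mem _ hm, hf⟩

theorem pvSelA_some (e : List Char) (op : List Char) (i : Int) (h : pvSelA e = some (op, i)) :
    2 ≤ op.length ∧ pvSpecOp e op = some i := by
  unfold pvSelA at h
  revert h
  cases h1 : pvFindGroupA e [['O','R'], ['N','O','R'], ['X','O','R']] with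
  | some x =>
    intro h
    obtain rfl : x = (op, i) := Option.some.inj h
    rcases pvFindGroupA_some e _ op i h1 with ⟨hm, hf⟩
    have hlen : 2 ≤ op.length := by
      simp only [List.mem_cons, List.not_mem_nil, or_false] at hm
      rcases hm with rfl | rfl | rfl <;> decide
    exact ⟨hlen, by rw [← pvFindOpA_eq_spec e op (by omega)]; exact hf⟩
  | none =>
    intro h
    rcases pvFindGroupA_some e _ op i h with ⟨hm, hf⟩
    have hlen : 2 ≤ op.length := by
      simp only [List.mem_cons, List.not_mem_nil, or_false] at hm
      rcases hm with rfl | rfl <;> decide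
    exact ⟨hlen, by rw [← pvFindOpA_eq_spec e op (by omega)]; exact hf⟩

-- ---- A's inline NOT-argument unwrapping equals B's helper ----
theorem pvNotArg_eq (arg : List Char) :
    (if PySem.Chars.startswith arg ['('] && PySem.Chars.endswith arg [')'] then
       (if pvCanRemove 0 arg then PySem.Chars.strip (PySem.List.slice arg (some 1) (some (-1))) else arg)
     else arg) = pvStripOuter arg := by
  unfold pvStripOuter
  cases h1 : pvCanRemove 0 arg <;> cases h2 : PySem.Chars.startswith arg ['('] <;>
    cases h3 : PySem.Chars.endswith arg [')'] <;> simp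

-- ---- the main equivalence, by induction on the fuel ----
theorem pvGo_eq (f : Nat) : ∀ cs : List Char, cs.length < f → pvGoA f cs = pvGoB f cs := by
  induction f with
  | zero => intro cs h; omega
  | succ f ih =>
    intro cs hcs
    simp only [pvGoA, pvGoB]
    rw [pvTopStrip_eq (PySem.Chars.strip cs)]
    set e := pvStripOuter (PySem.Chars.strip cs) with hE
    have hel : e.length ≤ cs.length :=
      le_trans (pvStripOuter_length_le (PySem.Chars.strip cs)) (pvStrip_le cs)
    rw [← pvSel_eq e]
    cases h1 : pvFindGroupA e [['O','R'], ['N','O','R'], ['X','O','R']] with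
    | some p =>
      obtain ⟨op, i⟩ := p
      have hs : pvSelA e = some (op, i) := by unfold pvSelA; rw [h1]
      rw [hs]
      dsimp only
      rcases pvSelA_some e op i hs with ⟨hlen, hspec⟩
      rcases pvSpecOp_bounds e op (by omega) i hspec with ⟨k, rfl, hk⟩
      have hcast : (k : Int) + (op.length : Int) = ((k + op.length : Nat) : Int) := by push_cast; ring
      rw [PySem.List.slice_to_natCast, hcast, PySem.List.slice_from_natCast]
      have hL : (PySem.Chars.strip (e.take k)).length < f := by
        have h1' := pvStrip_le (e.take k)
        have h2' : (e.take k).length ≤ k := by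
          rw [List.length_take]; omega
        omega
      have hR : (PySem.Chars.strip (e.drop (k + op.length))).length < f := by
        have h1' := pvStrip_le (e.drop (k + op.length))
        have h2' : (e.drop (k + op.length)).length = e.length - (k + op.length) := List.length_drop
        omega
      rw [ih _ hL, ih _ hR]
    | none =>
      cases h2 : pvFindGroupA e [['A','N','D'], ['N','A','N','D']] with
      | some p =>
        obtain ⟨op, i⟩ := p
        have hs : pvSelA e = some (op, i) := by unfold pvSelA; rw [h1, h2]
        rw [hs]
        dsimp only
        rcases pvSelA_some e op i hs with ⟨hlen, hspec⟩
        rcases pvSpecOp_bounds e op (by omega) i hspec with ⟨k, rfl, hk⟩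
        have hcast : (k : Int) + (op.length : Int) = ((k + op.length : Nat) : Int) := by push_cast; ring
        rw [PySem.List.slice_to_natCast, hcast, PySem.List.slice_from_natCast]
        have hL : (PySem.Chars.strip (e.take k)).length < f := by
          have h1' := pvStrip_le (e.take k)
          have h2' : (e.take k).length ≤ k := by
            rw [List.length_take]; omega
          omega
        have hR : (PySem.Chars.strip (e.drop (k + op.length))).length < f := by
          have h1' := pvStrip_le (e.drop (k + op.length))
          have h2' : (e.drop (k + op.length)).length = e.length - (k + op.length) := List.length_drop
          omega
        rw [ih _ hL, ih _ hR]
      | none =>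
        have hs : pvSelA e = none := by unfold pvSelA; rw [h1, h2]
        rw [hs]
        dsimp only
        by_cases hnot : PySem.Chars.startswith e ['N','O','T',' '] = true
        · rw [if_pos hnot, if_pos hnot, pvNotArg_eq]
          have h4 : 4 ≤ e.length := by
            have := ((PySem.Chars.startswith_iff _ _).mp hnot).length_le
            simpa using this
          have hslice : PySem.List.slice e (some (4 : Int)) none = e.drop 4 := by
            have h44 : ((4 : Nat) : Int) = (4 : Int) := by norm_num
            rw [← h44, PySem.List.slice_from_natCast]
          have harg : (pvStripOuter (PySem.Chars.strip (PySem.List.slice e (some (4 : Int)) none))).length < f := by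
            rw [hslice]
            have h1' := pvStripOuter_length_le (PySem.Chars.strip (e.drop 4))
            have h2' := pvStrip_le (e.drop 4)
            have h3' : (e.drop 4).length = e.length - 4 := List.length_drop
            omega
          rw [ih _ harg]
        · rw [if_neg hnot, if_neg hnot]

-- ===== VERDICT (by name: the statement is the Claim_ definition above) =====
theorem convert_to_function_calls_spec : Claim_equal_convert_to_function_calls := by
  intro s _
  unfold Spec_convert_to_function_calls convert_to_function_calls convert_to_function_calls_alt
  rw [pvGo_eq (s.toList.length + 1) s.toList (Nat.lt_succ_self _)]
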